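-- pv_equiv track=rewrite | github.com/D33pBlue/Apprendimento-Automatico | sms_spam/sms_evolutionaryNN_classification.py | bag_word
-- ===== SOURCE A (Python) =====
-- def bag_word(X):
--     words = set()
--     for x in X:
--         for w in x.split():
--              words.add(w)
--     bag = []
--     for w in words:
--         bag.append(w)
--     bag.sort()
--     return bag
-- ===== SOURCE B (Python) =====
-- def bag_word(X):
--     allw = []
--     for x in X:
--         allw.extend(x.split())
--     allw.sort()
--     bag = []
--     prev = None
--     for w in allw:
--         if prev is None or w != prev:
--             bag.append(w)
--             prev = w
--     return bag
-- ===== Notes on version B (the rewrite author's own statement) =====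
-- stated objective: alternative
-- what changed: B collects every word with duplicates into one flat list, sorts it, and removes adjacent duplicates in a single pass tracking the previously kept word, instead of maintaining a set and sorting its elements.
import Mathlib
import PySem

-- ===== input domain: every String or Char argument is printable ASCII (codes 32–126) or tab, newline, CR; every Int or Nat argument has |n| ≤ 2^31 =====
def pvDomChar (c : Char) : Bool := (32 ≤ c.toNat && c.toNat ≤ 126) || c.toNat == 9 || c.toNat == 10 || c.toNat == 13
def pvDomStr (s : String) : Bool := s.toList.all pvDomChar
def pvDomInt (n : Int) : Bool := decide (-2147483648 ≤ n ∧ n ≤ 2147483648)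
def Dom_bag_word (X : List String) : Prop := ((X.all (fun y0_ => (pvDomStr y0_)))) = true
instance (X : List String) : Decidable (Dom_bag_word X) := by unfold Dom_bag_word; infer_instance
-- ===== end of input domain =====

-- B collects all words with duplicates, sorts once, and drops adjacent duplicates in one pass,
-- instead of A's set maintained during collection; same return value (alternative decomposition).

-- ===== PORT A =====
def bag_word (X : List String) : List String :=
  let words := X.foldl (fun s x => (PySem.Str.split₀ x).foldl PySem.Set.add s) PySem.Set.empty
  let bag := words.foldl (fun b w => b ++ [w]) []
  PySem.List.sorted bag (fun w => w) false

-- ===== PORT B =====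
-- one iteration of Source B's dedup loop: append w unless it equals the previously kept word
def dedupStep (st : List String × Option String) (w : String) : List String × Option String :=
  match st.2 with
  | none => (st.1 ++ [w], some w)
  | some p => if w ≠ p then (st.1 ++ [w], some w) else st
def bag_word_alt (X : List String) : List String :=
  let allw := X.foldl (fun acc x => acc ++ PySem.Str.split₀ x) []
  let allw := PySem.List.sorted allw (fun w => w) false
  (allw.foldl dedupStep ([], none)).1

-- ===== PRECONDITION & SPEC =====
def Spec_bag_word (X : List String) (out : List String) : Prop := out = bag_word_alt X
instance (X : List String) (out : List String) : Decidable (Spec_bag_word X out) := by unfold Spec_bag_word; infer_instance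

-- ===== CLAIM (what is proved, stated in full; the proofs are below) =====
def Claim_equal_bag_word : Prop := ∀ (X : List String), Dom_bag_word X → Spec_bag_word X (bag_word X)

-- ===== LEMMAS AND PROOFS =====

-- structural form of B's one-pass adjacent dedup (proofs only; the port keeps Source B's fold)
def dedup1 (p : String) : List String → List String
  | [] => []
  | w :: l => if w ≠ p then w :: dedup1 w l else dedup1 p l

theorem dedupStep_some (acc : List String) (p w : String) :
    dedupStep (acc, some p) w = if w = p then (acc, some p) else (acc ++ [w], some w) := by
  by_cases h : w = p <;> simp [dedupStep, h]

theorem foldl_dedup1 (l : List String) (acc : List String) (p : String) :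
    l.foldl dedupStep (acc, some p) = (acc ++ dedup1 p l, some ((dedup1 p l).getLastD p)) := by
  induction l generalizing acc p with
  | nil => simp [dedup1]
  | cons w l ih =>
    rw [List.foldl_cons, dedupStep_some]
    by_cases h : w = p
    · subst h
      simpa [dedup1] using ih acc w
    · rw [if_neg h, ih]
      simp only [dedup1, ne_eq, h, not_false_eq_true, if_pos, List.append_assoc,
        List.singleton_append, Prod.mk.injEq, true_and]
      cases dedup1 w l <;> simp [List.getLastD]

theorem mem_dedup1_iff (l : List String) (p x : String) :
    x ∈ p :: dedup1 p l ↔ x ∈ p :: l := by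
  induction l generalizing p with
  | nil => simp [dedup1]
  | cons w l ih =>
    by_cases hw : w = p
    · subst hw
      rw [show dedup1 w (w :: l) = dedup1 w l from by simp [dedup1]]
      rw [ih w]
      simp
    · rw [show dedup1 p (w :: l) = w :: dedup1 w l from by simp [dedup1, hw]]
      constructor
      · intro h
        rcases List.mem_cons.mp h with h | h
        · exact h ▸ List.mem_cons_self
        · rcases List.mem_cons.mp ((ih w).mp h) with h' | h'
          · exact h' ▸ List.mem_cons_of_mem _ List.mem_cons_self
          · exact List.mem_cons_of_mem _ (List.mem_cons_of_mem _ h')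
      · intro h
        rcases List.mem_cons.mp h with h | h
        · exact h ▸ List.mem_cons_self
        · exact List.mem_cons_of_mem _ ((ih w).mpr h)

theorem pairwise_lt_dedup1 (l : List String) (p : String)
    (h : (p :: l).Pairwise (· ≤ ·)) : (p :: dedup1 p l).Pairwise (· < ·) := by
  induction l generalizing p with
  | nil => simp [dedup1]
  | cons w l ih =>
    rcases List.pairwise_cons.mp h with ⟨hp, hwl⟩
    by_cases hw : w = p
    · subst hw
      rw [show dedup1 w (w :: l) = dedup1 w l from by simp [dedup1]]
      exact ih w (List.pairwise_cons.mpr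
        ⟨fun y hy => hp y (List.mem_cons_of_mem _ hy), (List.pairwise_cons.mp hwl).2⟩)
    · rw [show dedup1 p (w :: l) = w :: dedup1 w l from by simp [dedup1, hw]]
      have hpw : p < w := lt_of_le_of_ne (hp w List.mem_cons_self) (Ne.symm hw)
      have htail := ih w hwl
      refine List.pairwise_cons.mpr ⟨?_, htail⟩
      intro y hy
      rcases List.mem_cons.mp hy with h' | h'
      · exact h' ▸ hpw
      · exact lt_trans hpw ((List.pairwise_cons.mp htail).1 y h')

-- A's set-building loop equals the set of the flat word list
theorem foldl_set_flat (X : List String) (s : List String) :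
    X.foldl (fun s x => (PySem.Str.split₀ x).foldl PySem.Set.add s) s
      = (X.flatMap PySem.Str.split₀).foldl PySem.Set.add s := by
  induction X generalizing s with
  | nil => simp
  | cons x X ih => simp [List.foldl_append, ih]

theorem bag_word_eq_alt (X : List String) : bag_word X = bag_word_alt X := by
  unfold bag_word bag_word_alt
  simp only [PySem.List.foldl_append_eq_flatMap, List.nil_append, List.flatMap_singleton',
    foldl_set_flat]
  set all := X.flatMap PySem.Str.split₀ with hall
  have hofList : all.foldl PySem.Set.add PySem.Set.empty = PySem.Set.ofList all := by
    rw [PySem.Set.ofList_eq_foldl]; rfl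
  rw [hofList]
  rcases hs : PySem.List.sorted all (fun w => w) false with _ | ⟨p, l⟩
  · have h0 : all = [] := by
      have := PySem.List.mem_sorted all (fun w => w) false
      rcases all with _ | ⟨a, t⟩
      · rfl
      · exfalso
        have := ((this a).mpr List.mem_cons_self)
        rw [hs] at this
        exact List.not_mem_nil this
    rw [h0]
    rfl
  · have hpair : (p :: l).Pairwise (· ≤ ·) := by
      have h := PySem.List.sorted_pairwise all (fun w => w)
      rw [hs] at h; exact h
    rw [List.foldl_cons]
    rw [show dedupStep ([], none) p = ([p], some p) from rfl]
    rw [foldl_dedup1]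
    have hlt := pairwise_lt_dedup1 l p hpair
    have hperm : (p :: dedup1 p l).Perm (PySem.Set.ofList all) := by
      rw [List.perm_ext_iff_of_nodup (hlt.imp ne_of_lt) (PySem.Set.nodup_ofList all)]
      intro a
      rw [mem_dedup1_iff, PySem.Set.mem_ofList, ← PySem.List.mem_sorted all (fun w => w) false, hs]
    have := PySem.List.sorted_eq_of_perm_of_pairwise_lt (PySem.Set.ofList all)
      (p :: dedup1 p l) (fun w => w) hperm hlt
    simpa using this

-- ===== VERDICT (by name: the statement is the Claim_ definition above) =====
theorem bag_word_spec : Claim_equal_bag_word := by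
  intro X _
  exact bag_word_eq_alt X
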